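-- pv_equiv track=rewrite | github.com/dhruvji/ansible_refactor | lib/ansible/inventory/patterns.py | order_patterns
-- ===== SOURCE A (Python) =====
-- def order_patterns(patterns):
--     ''' takes a list of patterns and reorders them by modifier to apply them consistently '''
--
--     pattern_regular = []
--     pattern_intersection = []
--     pattern_exclude = []
--     for p in patterns:
--         if not p:
--             continue
--
--         if p[0] == "!":
--             pattern_exclude.append(p)
--         elif p[0] == "&":
--             pattern_intersection.append(p)
--         else:
--             pattern_regular.append(p)
--
--     if pattern_regular == []:
--         pattern_regular = ['all']
--
--     return pattern_regular + pattern_intersection + pattern_exclude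
-- ===== SOURCE B (Python) =====
-- def order_patterns(patterns):
--     ''' takes a list of patterns and reorders them by modifier to apply them consistently '''
--     filtered = [p for p in patterns if p]
--     key = lambda p: 2 if p[0] == "!" else 1 if p[0] == "&" else 0
--     ordered = sorted(filtered, key=key)
--     if any(key(p) == 0 for p in filtered):
--         return ordered
--     return ['all'] + ordered
-- ===== Notes on version B (the rewrite author's own statement) =====
-- stated objective: alternative
-- what changed: Replaces the single-pass three-bucket partition with filtering out falsey patterns and one stable sort by a priority key (regular=0, '&'=1, '!'=2), prepending 'all' when no regular pattern exists.
import Mathlib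
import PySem

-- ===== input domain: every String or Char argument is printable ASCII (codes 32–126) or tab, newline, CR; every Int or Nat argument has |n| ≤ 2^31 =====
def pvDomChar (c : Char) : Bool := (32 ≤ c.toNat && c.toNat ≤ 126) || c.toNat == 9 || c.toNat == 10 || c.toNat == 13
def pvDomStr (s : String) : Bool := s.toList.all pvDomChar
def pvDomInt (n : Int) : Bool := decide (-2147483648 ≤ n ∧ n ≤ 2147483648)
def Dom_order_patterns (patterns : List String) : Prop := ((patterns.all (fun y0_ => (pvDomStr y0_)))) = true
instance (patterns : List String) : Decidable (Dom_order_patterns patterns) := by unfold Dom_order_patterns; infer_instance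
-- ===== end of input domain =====

-- B replaces A's single-pass three-bucket partition by filtering falsey patterns and one stable
-- sort by priority key (regular=0, '&'=1, '!'=2) with an 'all' fallback; alternative decomposition, not faster.


-- ===== PORT A =====
-- single pass over `patterns` keeping three bucket accumulators, exactly A's loop
def order_patterns (patterns : List String) : List String :=
  let t := patterns.foldl (fun (acc : List String × List String × List String) p =>
    match p.toList with
    | [] => acc                                  -- `if not p: continue`
    | c :: _ =>
      if c = '!' then (acc.1, acc.2.1, acc.2.2 ++ [p])
      else if c = '&' then (acc.1, acc.2.1 ++ [p], acc.2.2)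
      else (acc.1 ++ [p], acc.2.1, acc.2.2)) ([], [], [])
  let reg := if t.1 = [] then ["all"] else t.1
  reg ++ t.2.1 ++ t.2.2

-- ===== PORT B =====
-- B's key: 2 if p[0] == "!" else 1 if p[0] == "&" else 0 (only applied to non-empty strings)
def pvKey (p : String) : Int :=
  match p.toList with
  | [] => 0
  | c :: _ => if c = '!' then 2 else if c = '&' then 1 else 0

def order_patterns_alt (patterns : List String) : List String :=
  let filtered := patterns.filter (fun p => !p.toList.isEmpty)   -- [p for p in patterns if p]
  let ordered := PySem.List.sorted filtered pvKey                -- sorted(filtered, key=key) (stable)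
  if filtered.any (fun p => pvKey p == 0) then ordered
  else "all" :: ordered

-- ===== PRECONDITION & SPEC =====
def Spec_order_patterns (patterns : List String) (out : List String) : Prop := out = order_patterns_alt patterns
instance (patterns : List String) (out : List String) : Decidable (Spec_order_patterns patterns out) := by unfold Spec_order_patterns; infer_instance

-- ===== CLAIM (what is proved, stated in full; the proofs are below) =====
def Claim_equal_order_patterns : Prop := ∀ (patterns : List String), Dom_order_patterns patterns → Spec_order_patterns patterns (order_patterns patterns)

-- ===== LEMMAS AND PROOFS =====

lemma pvKey_cases (p : String) : pvKey p = 0 ∨ pvKey p = 1 ∨ pvKey p = 2 := by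
  unfold pvKey
  rcases p.toList with _ | ⟨c, cs⟩
  · simp
  · simp only []
    split_ifs <;> simp

lemma insertBy_skip (before : String → String → Bool) (x : String) (l r : List String)
    (h : ∀ y ∈ l, before x y = false) :
    PySem.List.insertBy before x (l ++ r) = l ++ PySem.List.insertBy before x r := by
  induction l with
  | nil => simp
  | cons a t ih =>
    have ha : before x a = false := h a (by
      simp)
    rcases ht : (t ++ r) with _ | ⟨b, bs⟩
    · have : t = [] ∧ r = [] := by
        constructor <;> [skip; skip] <;>
        · cases t <;> cases r <;> simp_all
      simp [PySem.List.insertBy, ha, this.1, this.2]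
    · simp only [List.cons_append, PySem.List.insertBy, ha]
      simp only [Bool.false_eq_true, if_false, List.cons.injEq, true_and]
      exact ih (fun y hy => h y (by simp [hy]))

lemma insertBy_front (before : String → String → Bool) (x : String) (r : List String)
    (h : ∀ y ∈ r, before x y = true) :
    PySem.List.insertBy before x r = x :: r := by
  cases r with
  | nil => simp [PySem.List.insertBy]
  | cons a t => simp [PySem.List.insertBy, h a (by simp)]

-- stable insertion-sort with a {0,1,2}-valued key fills three buckets in order
lemma foldl_insert_buckets (xs a0 a1 a2 : List String)
    (h0 : ∀ y ∈ a0, pvKey y = 0) (h1 : ∀ y ∈ a1, pvKey y = 1) (h2 : ∀ y ∈ a2, pvKey y = 2) :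
    xs.foldl (fun acc x => PySem.List.insertBy (fun a b => decide (pvKey a < pvKey b)) x acc)
        (a0 ++ a1 ++ a2)
      = (a0 ++ xs.filter (fun x => pvKey x == 0)) ++ (a1 ++ xs.filter (fun x => pvKey x == 1))
          ++ (a2 ++ xs.filter (fun x => pvKey x == 2)) := by
  induction xs generalizing a0 a1 a2 with
  | nil => simp
  | cons x t ih =>
    rcases pvKey_cases x with h | h | h
    · have hskip : ∀ y ∈ a0, (fun a b => decide (pvKey a < pvKey b)) x y = false := by
        intro y hy; simp [h, h0 y hy]
      have hfront : ∀ y ∈ a1 ++ a2, (fun a b => decide (pvKey a < pvKey b)) x y = true := by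
        intro y hy
        rcases List.mem_append.1 hy with hy' | hy'
        · simp [h, h1 y hy']
        · simp [h, h2 y hy']
      have hins : PySem.List.insertBy (fun a b => decide (pvKey a < pvKey b)) x (a0 ++ a1 ++ a2)
          = (a0 ++ [x]) ++ a1 ++ a2 := by
        rw [List.append_assoc, insertBy_skip _ x a0 (a1 ++ a2) hskip, insertBy_front _ x _ hfront]
        simp
      have hnew : ∀ y ∈ a0 ++ [x], pvKey y = 0 := by
        intro y hy
        rcases List.mem_append.1 hy with hy' | hy'
        · exact h0 y hy'
        · simp_all
      rw [List.foldl_cons, hins, ih (a0 ++ [x]) a1 a2 hnew h1 h2]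
      simp [h]
    · have hskip : ∀ y ∈ a0 ++ a1, (fun a b => decide (pvKey a < pvKey b)) x y = false := by
        intro y hy
        rcases List.mem_append.1 hy with hy' | hy'
        · simp [h, h0 y hy']
        · simp [h, h1 y hy']
      have hfront : ∀ y ∈ a2, (fun a b => decide (pvKey a < pvKey b)) x y = true := by
        intro y hy; simp [h, h2 y hy]
      have hins : PySem.List.insertBy (fun a b => decide (pvKey a < pvKey b)) x (a0 ++ a1 ++ a2)
          = a0 ++ (a1 ++ [x]) ++ a2 := by
        rw [insertBy_skip _ x (a0 ++ a1) a2 hskip, insertBy_front _ x a2 hfront]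
        simp
      have hnew : ∀ y ∈ a1 ++ [x], pvKey y = 1 := by
        intro y hy
        rcases List.mem_append.1 hy with hy' | hy'
        · exact h1 y hy'
        · simp_all
      rw [List.foldl_cons, hins, ih a0 (a1 ++ [x]) a2 h0 hnew h2]
      simp [h]
    · have hall : ∀ y ∈ a0 ++ a1 ++ a2, (fun a b => decide (pvKey a < pvKey b)) x y = false := by
        intro y hy
        rcases List.mem_append.1 hy with hy' | hy'
        · rcases List.mem_append.1 hy' with hy'' | hy''
          · simp [h, h0 y hy'']
          · simp [h, h1 y hy'']
        · simp [h, h2 y hy']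
      have hins : PySem.List.insertBy (fun a b => decide (pvKey a < pvKey b)) x (a0 ++ a1 ++ a2)
          = a0 ++ a1 ++ (a2 ++ [x]) := by
        rw [PySem.List.insertBy_of_forall_not_before _ _ _ hall]
        simp
      have hnew : ∀ y ∈ a2 ++ [x], pvKey y = 2 := by
        intro y hy
        rcases List.mem_append.1 hy with hy' | hy'
        · exact h2 y hy'
        · simp_all
      rw [List.foldl_cons, hins, ih a0 a1 (a2 ++ [x]) h0 h1 hnew]
      simp [h]

-- shorthand for the k-th bucket of the non-empty patterns
def pvBucket (patterns : List String) (k : Int) : List String :=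
  (patterns.filter (fun p => !p.toList.isEmpty)).filter (fun p => pvKey p == k)

-- A's loop computes exactly the three buckets, in order
lemma a_fold_eq (patterns r i e : List String) :
    patterns.foldl (fun (acc : List String × List String × List String) p =>
      match p.toList with
      | [] => acc
      | c :: _ =>
        if c = '!' then (acc.1, acc.2.1, acc.2.2 ++ [p])
        else if c = '&' then (acc.1, acc.2.1 ++ [p], acc.2.2)
        else (acc.1 ++ [p], acc.2.1, acc.2.2)) (r, i, e)
      = (r ++ pvBucket patterns 0, i ++ pvBucket patterns 1, e ++ pvBucket patterns 2) := by
  induction patterns generalizing r i e with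
  | nil => simp [pvBucket]
  | cons p t ih =>
    rcases hp : p.toList with _ | ⟨c, cs⟩
    · simp only [List.foldl_cons, hp]
      rw [ih]
      simp [pvBucket, hp]
    · have hkey : pvKey p = if c = '!' then 2 else if c = '&' then 1 else 0 := by
        unfold pvKey; rw [hp]
      simp only [List.foldl_cons, hp]
      by_cases hb : c = '!'
      · simp only [hb, if_true]
        rw [ih]
        simp [pvBucket, hp, hkey, hb]
      · by_cases ha : c = '&'
        · simp only [ha, if_true]
          rw [ih]
          simp [pvBucket, hp, hkey, hb, ha]
        · simp only [hb, ha, if_false]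
          rw [ih]
          simp [pvBucket, hp, hkey, hb, ha]

lemma sorted_eq_buckets (patterns : List String) :
    PySem.List.sorted (patterns.filter (fun p => !p.toList.isEmpty)) pvKey
      = pvBucket patterns 0 ++ pvBucket patterns 1 ++ pvBucket patterns 2 := by
  rw [PySem.List.sorted_eq_foldl_insertBy]
  have := foldl_insert_buckets (patterns.filter (fun p => !p.toList.isEmpty)) [] [] []
    (by simp) (by simp) (by simp)
  simpa [pvBucket] using this

-- ===== VERDICT (by name: the statement is the Claim_ definition above) =====
theorem order_patterns_spec : Claim_equal_order_patterns := by
  intro patterns _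
  unfold Spec_order_patterns order_patterns order_patterns_alt
  dsimp only
  rw [a_fold_eq patterns [] [] [], sorted_eq_buckets]
  simp only [List.nil_append]
  by_cases h0 : pvBucket patterns 0 = []
  · have hany : (patterns.filter (fun p => !p.toList.isEmpty)).any (fun p => pvKey p == 0) = false := by
      rw [List.any_eq_false]
      intro p hp
      intro hk
      have : p ∈ pvBucket patterns 0 := by
        unfold pvBucket
        exact List.mem_filter.2 ⟨hp, hk⟩
      simp [h0] at this
    simp [h0, hany]
  · have hex : ∃ p ∈ patterns.filter (fun p => !p.toList.isEmpty), (pvKey p == 0) = true := by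
      rcases List.exists_mem_of_ne_nil _ h0 with ⟨p, hp⟩
      unfold pvBucket at hp
      rcases List.mem_filter.1 hp with ⟨hp1, hp2⟩
      exact ⟨p, hp1, hp2⟩
    have hany : (patterns.filter (fun p => !p.toList.isEmpty)).any (fun p => pvKey p == 0) = true :=
      List.any_eq_true.2 hex
    simp [h0, hany]
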